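-- pv_equiv track=rewrite | github.com/thorelvin/AMS-HAN-Gateway | ams_han_reflex_app/backend/protocol.py | mask_sensitive_command
-- ===== SOURCE A (Python) =====
-- SENSITIVE_INDEXES = {
--     "SET_WIFI": {2},
--     "SET_MQTT": {4},
-- }
--
-- def escape_command_field(value: object) -> str:
--     text = str(value)
--     return (
--         text.replace("\\", "\\\\")
--         .replace(",", "\\,")
--         .replace("\n", "\\n")
--         .replace("\r", "\\r")
--     )
--
-- def split_escaped_fields(text: str) -> list[str]:
--     fields: list[str] = []
--     buf: list[str] = []
--     escaping = False
--     for ch in text: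
--         if escaping:
--             if ch == "n":
--                 buf.append("\n")
--             elif ch == "r":
--                 buf.append("\r")
--             else:
--                 buf.append(ch)
--             escaping = False
--             continue
--         if ch == "\\":
--             escaping = True
--             continue
--         if ch == ",":
--             fields.append("".join(buf))
--             buf = []
--             continue
--         buf.append(ch)
--     if escaping:
--         buf.append("\\")
--     fields.append("".join(buf))
--     return fields
--
-- def build_command(*parts: object) -> str:
--     return ",".join(escape_command_field(part) for part in parts if part is not None)
--
-- def mask_sensitive_command(command: str) -> str:
--     raw = command.strip()
--     if not raw:
--         return raw
--
--     parts = split_escaped_fields(raw)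
--     if not parts:
--         return raw
--
--     indexes = SENSITIVE_INDEXES.get(parts[0])
--     if not indexes:
--         return raw
--
--     for idx in indexes:
--         if idx < len(parts):
--             parts[idx] = "***"
--     return build_command(*parts)
-- ===== SOURCE B (Python) =====
-- SENSITIVE_INDEXES = {
--     "SET_WIFI": {2},
--     "SET_MQTT": {4},
-- }
--
-- def _parse_first_field(raw: str) -> str:
--     acc = []
--     esc = False
--     for ch in raw:
--         if esc:
--             acc.append("\n" if ch == "n" else "\r" if ch == "r" else ch)
--             esc = False
--         elif ch == "\\":
--             esc = True
--         elif ch == ",":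
--             return "".join(acc)
--         else:
--             acc.append(ch)
--     if esc:
--         acc.append("\\")
--     return "".join(acc)
--
-- def _reescape_after_backslash(ch: str) -> str:
--     c = "\n" if ch == "n" else "\r" if ch == "r" else ch
--     if c == "\\":
--         return "\\\\"
--     if c == ",":
--         return "\\,"
--     if c == "\n":
--         return "\\n"
--     if c == "\r":
--         return "\\r"
--     return c
--
-- def mask_sensitive_command(command: str) -> str:
--     raw = command.strip()
--     if not raw:
--         return raw
--     indexes = SENSITIVE_INDEXES.get(_parse_first_field(raw))
--     if not indexes:
--         return raw
--     # single fused pass: split, mask, unescape and re-escape at once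
--     out = []
--     esc = False
--     field = 0
--     for ch in raw:
--         if esc:
--             esc = False
--             if field not in indexes:
--                 out.append(_reescape_after_backslash(ch))
--         elif ch == "\\":
--             esc = True
--         elif ch == ",":
--             if field in indexes:
--                 out.append("***")
--             out.append(",")
--             field += 1
--         else:
--             if field not in indexes:
--                 out.append("\\n" if ch == "\n" else "\\r" if ch == "\r" else ch)
--     if esc and field not in indexes:
--         out.append("\\\\")
--     if field in indexes:
--         out.append("***")
--     return "".join(out)
-- ===== Notes on version B (the rewrite author's own statement) =====
-- stated objective: alternative
-- what changed: Instead of A's three-stage pipeline (split the escaped string into unescaped fields, overwrite sensitive fields, then re-escape and join every field), B parses only the command name and, for sensitive commands, makes one fused left-to-right pass over the raw string that tracks the escape flag and field index and emits the re-escaped characters or the mask marker directly.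
import Mathlib
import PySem

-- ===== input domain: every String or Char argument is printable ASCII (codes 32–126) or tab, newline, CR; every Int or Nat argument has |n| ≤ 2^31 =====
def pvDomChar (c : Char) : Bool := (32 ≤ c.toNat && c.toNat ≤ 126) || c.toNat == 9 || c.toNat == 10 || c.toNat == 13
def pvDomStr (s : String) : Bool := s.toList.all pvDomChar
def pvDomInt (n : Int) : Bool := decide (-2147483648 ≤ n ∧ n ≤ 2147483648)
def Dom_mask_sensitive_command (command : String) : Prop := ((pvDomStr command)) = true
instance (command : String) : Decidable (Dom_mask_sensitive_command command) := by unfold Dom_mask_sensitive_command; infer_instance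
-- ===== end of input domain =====

-- B fuses A's split → mask → re-escape pipeline into a first-field parse plus one
-- left-to-right masking pass over the raw string (objective: alternative decomposition).

-- ===== PORT A =====

-- Python dict of sensitive field indexes (values are sets of ints → lists of distinct Int)
def SENSITIVE_INDEXES : PySem.Dict String (List Int) :=
  PySem.Dict.mk [("SET_WIFI", [(2:Int)]), ("SET_MQTT", [4])]

-- escape_command_field: the four chained str.replace calls (str(value) is the identity here,
-- since all call sites pass strings)
def escape_command_field (value : String) : String :=
  PySem.Str.replace
    (PySem.Str.replace
      (PySem.Str.replace
        (PySem.Str.replace value "\\" "\\\\")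
        "," "\\,")
      "\n" "\\n")
    "\r" "\\r"

-- the for-loop of split_escaped_fields, state (fields, buf, escaping), over s.toList
def splitGo : List Char → List String → List Char → Bool → List String
  | [], fields, buf, escaping =>
      fields ++ [String.ofList (if escaping then buf ++ ['\\'] else buf)]
  | c :: rest, fields, buf, escaping =>
      if escaping then
        splitGo rest fields
          (buf ++ [if c = 'n' then '\n' else if c = 'r' then '\r' else c]) false
      else if c = '\\' then splitGo rest fields buf true
      else if c = ',' then splitGo rest (fields ++ [String.ofList buf]) [] false
      else splitGo rest fields (buf ++ [c]) false

def split_escaped_fields (text : String) : List String :=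
  splitGo text.toList [] [] false

-- build_command: the 'part is not None' filter is vacuous here (every part is a str)
def build_command (parts : List String) : String :=
  PySem.Str.join "," (parts.map escape_command_field)

def mask_sensitive_command (command : String) : String :=
  let raw := PySem.Str.strip command
  if raw = "" then raw
  else
    let parts := split_escaped_fields raw
    if parts = [] then raw
    else
      match SENSITIVE_INDEXES.get? parts.headI with
      | none => raw
      | some idxs =>
          if idxs = [] then raw
          else
            -- for idx in indexes: if idx < len(parts): parts[idx] = "***"
            -- (idx.toNat is exact: both stored index sets hold nonnegative ints only)
            build_command (idxs.foldl
              (fun ps idx => if idx < (ps.length : Int) then ps.set idx.toNat "***" else ps)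
              parts)

-- ===== PORT B =====

-- _parse_first_field's loop (acc, esc) over raw
def nameGo : List Char → Bool → List Char → List Char
  | [], esc, acc => if esc then acc ++ ['\\'] else acc
  | c :: rest, esc, acc =>
      if esc then
        nameGo rest false (acc ++ [if c = 'n' then '\n' else if c = 'r' then '\r' else c])
      else if c = '\\' then nameGo rest true acc
      else if c = ',' then acc
      else nameGo rest false (acc ++ [c])

-- _reescape_after_backslash
def reescapeAfterBackslash (ch : Char) : List Char :=
  let c := if ch = 'n' then '\n' else if ch = 'r' then '\r' else ch
  if c = '\\' then ['\\', '\\']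
  else if c = ',' then ['\\', ',']
  else if c = '\n' then ['\\', 'n']
  else if c = '\r' then ['\\', 'r']
  else [c]

-- the fused masking pass: state (esc, field, out)
def maskGo (sens : List Int) : List Char → Bool → Int → List Char → List Char
  | [], esc, field, out =>
      ((if esc && !(sens.contains field) then out ++ ['\\', '\\'] else out)
        ++ (if sens.contains field then ['*', '*', '*'] else []))
  | c :: rest, esc, field, out =>
      if esc then
        maskGo sens rest false field
          (if sens.contains field then out else out ++ reescapeAfterBackslash c)
      else if c = '\\' then maskGo sens rest true field out
      else if c = ',' then
        maskGo sens rest false (field + 1)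
          ((if sens.contains field then out ++ ['*', '*', '*'] else out) ++ [','])
      else
        maskGo sens rest false field
          (if sens.contains field then out
           else out ++ (if c = '\n' then ['\\', 'n'] else if c = '\r' then ['\\', 'r'] else [c]))

def mask_sensitive_command_alt (command : String) : String :=
  let raw := PySem.Str.strip command
  if raw = "" then raw
  else
    match SENSITIVE_INDEXES.get? (String.ofList (nameGo raw.toList false [])) with
    | none => raw
    | some idxs =>
        if idxs = [] then raw
        else String.ofList (maskGo idxs raw.toList false 0 [])

-- ===== PRECONDITION & SPEC =====
def Spec_mask_sensitive_command (command : String) (out : String) : Prop := out = mask_sensitive_command_alt command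
instance (command : String) (out : String) : Decidable (Spec_mask_sensitive_command command out) := by unfold Spec_mask_sensitive_command; infer_instance

-- ===== CLAIM (what is proved, stated in full; the proofs are below) =====
def Claim_equal_mask_sensitive_command : Prop := ∀ (command : String), Dom_mask_sensitive_command command → Spec_mask_sensitive_command command (mask_sensitive_command command)


-- ===== LEMMAS AND PROOFS =====

-- per-char re-escaping: what escape_command_field does to one character
def escCh (c : Char) : List Char :=
  if c = '\\' then ['\\','\\'] else if c = ',' then ['\\',',']
  else if c = '\n' then ['\\','n'] else if c = '\r' then ['\\','r'] else [c]

theorem replace_go_single (a : Char) (new : List Char) :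
    ∀ (l : List Char) (fuel : Nat) (acc : List Char), l.length ≤ fuel →
    PySem.Chars.replace.go [a] new fuel l acc
      = acc.reverse ++ l.flatMap (fun c => if c = a then new else [c]) := by
  intro l
  induction l with
  | nil => intro fuel acc h; cases fuel <;> simp [PySem.Chars.replace.go]
  | cons c t ih =>
    intro fuel acc h
    cases fuel with
    | zero => simp at h
    | succ f =>
      simp only [PySem.Chars.replace.go]
      by_cases hc : c = a
      · simp [hc, List.isPrefixOf, ih f (new.reverse ++ acc) (by simpa using h)]
      · have hp : ([a] : List Char).isPrefixOf (c :: t) = false := by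
          simp [List.isPrefixOf]; exact fun h' => (hc h'.symm).elim
        simp [hp, ih f (c :: acc) (by simpa using h), hc]

theorem replace_single (a : Char) (new : List Char) (s : List Char) :
    PySem.Chars.replace s [a] new = s.flatMap (fun c => if c = a then new else [c]) := by
  simp [PySem.Chars.replace, replace_go_single a new s s.length [] le_rfl]

theorem comp_escCh (c : Char) :
    List.flatMap
      (fun x =>
        List.flatMap
          (fun x =>
            List.flatMap (fun c => if c = '\r' then ['\\', 'r'] else [c])
              (if x = '\n' then ['\\', 'n'] else [x]))
          (if x = ',' then ['\\', ','] else [x]))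
      (if c = '\\' then ['\\', '\\'] else [c]) = escCh c := by
  by_cases h1 : c = '\\' <;> by_cases h2 : c = ',' <;>
    by_cases h3 : c = '\n' <;> by_cases h4 : c = '\r' <;>
    simp_all [escCh]

theorem escape_eq (s : String) :
    (escape_command_field s).toList = s.toList.flatMap escCh := by
  have h1 : ("\\" : String).toList = ['\\'] := by decide
  have h2 : ("\\\\" : String).toList = ['\\','\\'] := by decide
  have h3 : ("," : String).toList = [','] := by decide
  have h4 : ("\\," : String).toList = ['\\',','] := by decide
  have h5 : ("\n" : String).toList = ['\n'] := by decide
  have h6 : ("\\n" : String).toList = ['\\','n'] := by decide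
  have h7 : ("\r" : String).toList = ['\r'] := by decide
  have h8 : ("\\r" : String).toList = ['\\','r'] := by decide
  simp only [escape_command_field, PySem.Str.toList_replace, h1, h2, h3, h4, h5, h6, h7, h8]
  rw [replace_single, replace_single, replace_single, replace_single,
      List.flatMap_assoc, List.flatMap_assoc, List.flatMap_assoc]
  exact List.flatMap_congr (fun c _ => comp_escCh c)

-- the masked, escaped, comma-joined rendering of a field list, starting at field index i
def maskF (sens : List Int) (i : Int) (f : String) : List Char :=
  if sens.contains i then ['*','*','*'] else f.toList.flatMap escCh

def joinMask (sens : List Int) : Int → List String → List Char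
  | _, [] => []
  | i, [f] => maskF sens i f
  | i, f :: g :: rest => maskF sens i f ++ ',' :: joinMask sens (i+1) (g :: rest)

theorem joinMask_cons (sens : List Int) (i : Int) (f : String) (L : List String) (h : L ≠ []) :
    joinMask sens i (f :: L) = maskF sens i f ++ ',' :: joinMask sens (i+1) L := by
  cases L with
  | nil => exact (h rfl).elim
  | cons g rest => rfl

theorem splitGo_nil (fields : List String) (buf : List Char) (esc : Bool) :
    splitGo [] fields buf esc
      = fields ++ [String.ofList (if esc then buf ++ ['\\'] else buf)] := rfl

theorem splitGo_cons (c : Char) (rest : List Char) (fields : List String)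
    (buf : List Char) (esc : Bool) :
    splitGo (c :: rest) fields buf esc
      = if esc then
          splitGo rest fields (buf ++ [if c = 'n' then '\n' else if c = 'r' then '\r' else c]) false
        else if c = '\\' then splitGo rest fields buf true
        else if c = ',' then splitGo rest (fields ++ [String.ofList buf]) [] false
        else splitGo rest fields (buf ++ [c]) false := rfl

theorem nameGo_nil (esc : Bool) (acc : List Char) :
    nameGo [] esc acc = if esc then acc ++ ['\\'] else acc := rfl

theorem nameGo_cons (c : Char) (rest : List Char) (esc : Bool) (acc : List Char) :
    nameGo (c :: rest) esc acc
      = if esc then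
          nameGo rest false (acc ++ [if c = 'n' then '\n' else if c = 'r' then '\r' else c])
        else if c = '\\' then nameGo rest true acc
        else if c = ',' then acc
        else nameGo rest false (acc ++ [c]) := rfl

theorem splitGo_append : ∀ (chars : List Char) (fields : List String) (buf : List Char) (esc : Bool),
    splitGo chars fields buf esc = fields ++ splitGo chars [] buf esc := by
  intro chars
  induction chars with
  | nil => intro fields buf esc; rw [splitGo_nil, splitGo_nil]; simp
  | cons c rest ih =>
    intro fields buf esc
    rw [splitGo_cons, splitGo_cons]
    by_cases he : esc = true
    · simp only [he, if_true]; exact ih _ _ _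
    · by_cases hb : c = '\\'
      · simp only [he, hb, if_true]; exact ih _ _ _
      · by_cases hc : c = ','
        · rw [if_neg he, if_neg he, if_neg hb, if_neg hb, if_pos hc, if_pos hc]
          rw [ih (fields ++ [String.ofList buf]) [] false,
              ih ([] ++ [String.ofList buf]) [] false]
          simp
        · simp only [he, hb, hc, if_false]; exact ih _ _ _

theorem splitGo_ne_nil : ∀ (chars : List Char) (buf : List Char) (esc : Bool),
    splitGo chars [] buf esc ≠ [] := by
  intro chars buf esc h
  have := congrArg List.length h
  rw [splitGo_append] at this
  cases hs : splitGo chars [] buf esc with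
  | nil =>
    clear this h
    induction chars generalizing buf esc with
    | nil => rw [splitGo_nil] at hs; simp at hs
    | cons c rest ih =>
      rw [splitGo_cons] at hs
      by_cases he : esc = true
      · rw [if_pos he] at hs; exact ih _ _ hs
      · rw [if_neg he] at hs
        by_cases hb : c = '\\'
        · rw [if_pos hb] at hs; exact ih _ _ hs
        · rw [if_neg hb] at hs
          by_cases hc : c = ','
          · rw [if_pos hc, splitGo_append] at hs; simp at hs
          · rw [if_neg hc] at hs; exact ih _ _ hs
  | cons x xs => rw [hs] at h; simp at h

theorem splitGo_headI : ∀ (chars : List Char) (esc : Bool) (buf : List Char),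
    (splitGo chars [] buf esc).headI = String.ofList (nameGo chars esc buf) := by
  intro chars
  induction chars with
  | nil => intro esc buf; rw [splitGo_nil, nameGo_nil]; cases esc <;> simp
  | cons c rest ih =>
    intro esc buf
    rw [splitGo_cons, nameGo_cons]
    by_cases he : esc = true
    · simp only [he, if_true]; exact ih _ _
    · by_cases hb : c = '\\'
      · simp only [he, hb, if_true]; exact ih _ _
      · by_cases hc : c = ','
        · rw [if_neg he, if_neg he, if_neg hb, if_neg hb, if_pos hc, if_pos hc]
          rw [splitGo_append rest ([] ++ [String.ofList buf]) [] false]; simp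
        · simp only [he, hb, hc, if_false]; exact ih _ _

theorem reescape_eq (c : Char) :
    reescapeAfterBackslash c = escCh (if c = 'n' then '\n' else if c = 'r' then '\r' else c) := by
  by_cases h1 : c = 'n' <;> by_cases h2 : c = 'r' <;>
    simp_all [reescapeAfterBackslash, escCh]

theorem maskGo_nil (sens : List Int) (esc : Bool) (field : Int) (out : List Char) :
    maskGo sens [] esc field out
      = ((if esc && !(sens.contains field) then out ++ ['\\', '\\'] else out)
          ++ (if sens.contains field then ['*', '*', '*'] else [])) := rfl

theorem maskGo_cons (sens : List Int) (c : Char) (rest : List Char) (esc : Bool)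
    (field : Int) (out : List Char) :
    maskGo sens (c :: rest) esc field out
      = if esc then
          maskGo sens rest false field
            (if sens.contains field then out else out ++ reescapeAfterBackslash c)
        else if c = '\\' then maskGo sens rest true field out
        else if c = ',' then
          maskGo sens rest false (field + 1)
            ((if sens.contains field then out ++ ['*', '*', '*'] else out) ++ [','])
        else
          maskGo sens rest false field
            (if sens.contains field then out
             else out ++ (if c = '\n' then ['\\', 'n'] else if c = '\r' then ['\\', 'r'] else [c])) := rfl

theorem escPlain_eq (c : Char) (hb : c ≠ '\\') (hc : c ≠ ',') :
    (if c = '\n' then ['\\', 'n'] else if c = '\r' then ['\\', 'r'] else [c]) = escCh c := by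
  simp [escCh, hb, hc]

-- MAIN invariant: the fused pass produces exactly the masked-escaped-join of the split
theorem maskGo_joinMask (sens : List Int) :
    ∀ (chars : List Char) (esc : Bool) (i : Int) (buf acc : List Char),
    maskGo sens chars esc i (acc ++ (if sens.contains i then [] else buf.flatMap escCh))
      = acc ++ joinMask sens i (splitGo chars [] buf esc) := by
  intro chars
  induction chars with
  | nil =>
    intro esc i buf acc
    rw [splitGo_nil, maskGo_nil]
    by_cases hm : i ∈ sens
    · simp [hm, joinMask, maskF]
    · cases esc <;>
        simp [hm, joinMask, maskF, String.toList_ofList, List.flatMap_append, escCh,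
          List.append_assoc]
  | cons c rest ih =>
    intro esc i buf acc
    rw [maskGo_cons, splitGo_cons]
    by_cases he : esc = true
    · rw [if_pos he, if_pos he]
      have harg : (if sens.contains i = true then
            (acc ++ if sens.contains i = true then [] else buf.flatMap escCh)
          else (acc ++ if sens.contains i = true then [] else buf.flatMap escCh)
            ++ reescapeAfterBackslash c)
          = acc ++ (if sens.contains i = true then [] else
              (buf ++ [if c = 'n' then '\n' else if c = 'r' then '\r' else c]).flatMap escCh) := by
        by_cases hm : i ∈ sens <;>
          simp [hm, reescape_eq, List.flatMap_append, List.append_assoc]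
      rw [harg, ih false i _ acc]
    · rw [if_neg he, if_neg he]
      by_cases hb : c = '\\'
      · rw [if_pos hb, if_pos hb]
        exact ih true i buf acc
      · rw [if_neg hb, if_neg hb]
        by_cases hc : c = ','
        · rw [if_pos hc, if_pos hc]
          have harg : ((if sens.contains i = true then
                (acc ++ if sens.contains i = true then [] else buf.flatMap escCh) ++ ['*','*','*']
              else (acc ++ if sens.contains i = true then [] else buf.flatMap escCh)) ++ [','])
              = (acc ++ maskF sens i (String.ofList buf) ++ [','])
                ++ (if sens.contains (i + 1) = true then [] else ([] : List Char).flatMap escCh) := by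
            by_cases hm : i ∈ sens <;>
              simp [hm, maskF, String.toList_ofList, List.append_assoc]
          rw [harg, ih false (i + 1) [] (acc ++ maskF sens i (String.ofList buf) ++ [','])]
          rw [splitGo_append rest ([] ++ [String.ofList buf]) [] false]
          simp only [List.nil_append, List.singleton_append]
          rw [joinMask_cons sens i (String.ofList buf) _ (splitGo_ne_nil rest [] false)]
          simp [List.append_assoc]
        · rw [if_neg hc, if_neg hc]
          have harg : (if sens.contains i = true then
                (acc ++ if sens.contains i = true then [] else buf.flatMap escCh)
              else (acc ++ if sens.contains i = true then [] else buf.flatMap escCh)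
                ++ (if c = '\n' then ['\\', 'n'] else if c = '\r' then ['\\', 'r'] else [c]))
              = acc ++ (if sens.contains i = true then [] else (buf ++ [c]).flatMap escCh) := by
            by_cases hm : i ∈ sens <;>
              simp [hm, escPlain_eq c hb hc, List.flatMap_append, List.append_assoc]
          rw [harg, ih false i (buf ++ [c]) acc]

theorem starsEsc : ("***" : String).toList.flatMap escCh = ['*','*','*'] := by decide

theorem joinMask_single (k : Int) : ∀ (parts : List String) (i : Int),
    joinMask [k] i parts
      = PySem.Chars.join [','] (((if 0 ≤ k - i ∧ k - i < (parts.length : Int)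
            then parts.set (k-i).toNat "***" else parts)).map (fun f => f.toList.flatMap escCh)) := by
  intro parts
  induction parts with
  | nil =>
    intro i
    simp [joinMask, PySem.Chars.join_nil]
  | cons f tail ih =>
    intro i
    by_cases hk : k = i
    · have hcond : 0 ≤ k - i ∧ k - i < ((f :: tail).length : Int) := by
        constructor <;> simp [hk]
      have hset : (f :: tail).set (k - i).toNat "***" = "***" :: tail := by
        simp [hk]
      rw [if_pos hcond, hset]
      cases tail with
      | nil =>
        simp [joinMask, maskF, hk, PySem.Chars.join_singleton, escCh]
      | cons g rest =>
        have hno : ¬ (0 ≤ k - (i+1) ∧ k - (i+1) < ((g :: rest).length : Int)) := by omega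
        have ih' := ih (i + 1)
        rw [if_neg hno] at ih'
        simp only [List.map_cons] at ih' ⊢
        rw [joinMask_cons [k] i f (g :: rest) (by simp),
            PySem.Chars.join_cons_cons, starsEsc, ← ih']
        simp [maskF, hk]
    · have hik : i ≠ k := fun h => hk h.symm
      cases tail with
      | nil =>
        have hno : ¬ (0 ≤ k - i ∧ k - i < (([f] : List String).length : Int)) := by
          simp; omega
        rw [if_neg hno]
        simp [joinMask, maskF, hik, PySem.Chars.join_singleton]
      | cons g rest =>
        rw [joinMask_cons [k] i f (g :: rest) (by simp)]
        have ih' := ih (i + 1)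
        by_cases hcond : 0 ≤ k - i ∧ k - i < (((f :: g :: rest)).length : Int)
        · have hcond' : 0 ≤ k - (i+1) ∧ k - (i+1) < ((g :: rest).length : Int) := by
            obtain ⟨h1, h2⟩ := hcond
            simp at h2 ⊢
            constructor <;> omega
          have hset : (f :: g :: rest).set (k - i).toNat "***"
              = f :: ((g :: rest).set (k - (i+1)).toNat "***") := by
            have : (k - i).toNat = (k - (i+1)).toNat + 1 := by omega
            rw [this]; rfl
          rw [if_pos hcond, hset]
          rw [if_pos hcond'] at ih'
          cases hres : (g :: rest).set (k - (i+1)).toNat "***" with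
          | nil => simp at hres
          | cons x xs =>
            rw [hres] at ih'
            simp only [List.map_cons] at ih' ⊢
            rw [PySem.Chars.join_cons_cons, ← ih']
            simp [maskF, hik]
        · have hcond' : ¬ (0 ≤ k - (i+1) ∧ k - (i+1) < ((g :: rest).length : Int)) := by
            simp at hcond ⊢
            omega
          rw [if_neg hcond]
          rw [if_neg hcond'] at ih'
          simp only [List.map_cons] at ih' ⊢
          rw [PySem.Chars.join_cons_cons, ← ih']
          simp [maskF, hik, List.append_assoc]

theorem dict_vals (name : String) (idxs : List Int)
    (h : SENSITIVE_INDEXES.get? name = some idxs) : idxs = [2] ∨ idxs = [4] := by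
  by_cases h1 : name = "SET_WIFI" <;> by_cases h2 : name = "SET_MQTT" <;>
    simp [SENSITIVE_INDEXES, h1, h2, PySem.Dict.get?] at h
  · exact Or.inl h.symm
  · exact Or.inl h.symm
  · exact Or.inr h.symm
  · obtain ⟨a, h⟩ := h
    rcases h with ⟨e, -, -⟩ | ⟨-, e, -, -⟩
    · exact absurd e.symm h1
    · exact absurd e.symm h2

-- ===== VERDICT (by name: the statement is the Claim_ definition above) =====
-- A's build of a masked parts list, rendered on the char level
theorem build_command_toList (P : List String) :
    (build_command P).toList
      = PySem.Chars.join [','] (P.map (fun f => f.toList.flatMap escCh)) := by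
  have hsep : ("," : String).toList = [','] := by decide
  unfold build_command
  rw [PySem.Str.toList_join, hsep, List.map_map]
  have h : (String.toList ∘ escape_command_field) = fun f => f.toList.flatMap escCh :=
    funext escape_eq
  rw [h]

theorem sensitive_branch (raw : String) (k : Int) (hk : 0 ≤ k) :
    build_command
        (if k < ((split_escaped_fields raw).length : Int)
          then (split_escaped_fields raw).set k.toNat "***" else split_escaped_fields raw)
      = String.ofList (maskGo [k] raw.toList false 0 []) := by
  apply String.toList_inj.mp
  rw [String.toList_ofList, build_command_toList]
  have hmain := maskGo_joinMask [k] raw.toList false 0 [] []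
  simp only [List.flatMap_nil, ite_self, List.append_nil, List.nil_append] at hmain
  rw [hmain]
  have hj := joinMask_single k (split_escaped_fields raw) 0
  rw [show splitGo raw.toList [] [] false = split_escaped_fields raw from rfl, hj]
  congr 1
  have hsub : k - 0 = k := by omega
  rw [hsub]
  by_cases hlen : k < ((split_escaped_fields raw).length : Int)
  · rw [if_pos hlen, if_pos ⟨hk, hlen⟩]
  · rw [if_neg hlen, if_neg (by omega)]

theorem mask_sensitive_command_spec : Claim_equal_mask_sensitive_command := by
  intro command _
  unfold Spec_mask_sensitive_command mask_sensitive_command mask_sensitive_command_alt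
  by_cases hr : PySem.Str.strip command = ""
  · simp [hr]
  · rw [if_neg hr, if_neg hr]
    have hne : split_escaped_fields (PySem.Str.strip command) ≠ [] :=
      splitGo_ne_nil _ _ _
    rw [if_neg hne]
    have hkey : (split_escaped_fields (PySem.Str.strip command)).headI
        = String.ofList (nameGo (PySem.Str.strip command).toList false []) :=
      splitGo_headI _ _ _
    rw [hkey]
    cases hget : SENSITIVE_INDEXES.get?
        (String.ofList (nameGo (PySem.Str.strip command).toList false [])) with
    | none => rfl
    | some idxs =>
      rcases dict_vals _ _ hget with h | h <;> subst h <;> dsimp only <;>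
        rw [if_neg (by simp), if_neg (by simp)] <;>
        simp only [List.foldl_cons, List.foldl_nil] <;>
        exact sensitive_branch _ _ (by norm_num)
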